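-- pv_equiv track=rewrite | github.com/JaredJGartner/SB_neoantigen_Models | src/functions4model.py | anchor_cysteine_check
-- ===== SOURCE A (Python) =====
-- def anchor_cysteine_check(pep, AA):
--     ##record if aa in anchor residues of
--     ##peptide output list of positions (0-based)
--     ##that need to be changed
--     pep = pep.strip()
--     anchor_residues = [1,2,len(pep)-1]
--     cys_pos = [i for i, aa in enumerate(pep) if aa == AA]
--     cys_anchors = [pos for pos in anchor_residues if pos in cys_pos]
--     if len(cys_anchors)>0:
--         return 1
--     else:
--         return 0
-- ===== SOURCE B (Python) =====
-- def anchor_cysteine_check(pep, AA):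
--     ##direct O(1) check of the three anchor positions (no scan of the peptide)
--     pep = pep.strip()
--     n = len(pep)
--     for pos in (1, 2, n - 1):
--         if 0 <= pos < n and pep[pos] == AA:
--             return 1
--     return 0
-- ===== Notes on version B (the rewrite author's own statement) =====
-- stated objective: faster
-- what changed: Instead of enumerating the whole peptide to build the list of matching indices and intersecting it with the anchor list, B bounds-checks and tests the three anchor positions directly.
import Mathlib
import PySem

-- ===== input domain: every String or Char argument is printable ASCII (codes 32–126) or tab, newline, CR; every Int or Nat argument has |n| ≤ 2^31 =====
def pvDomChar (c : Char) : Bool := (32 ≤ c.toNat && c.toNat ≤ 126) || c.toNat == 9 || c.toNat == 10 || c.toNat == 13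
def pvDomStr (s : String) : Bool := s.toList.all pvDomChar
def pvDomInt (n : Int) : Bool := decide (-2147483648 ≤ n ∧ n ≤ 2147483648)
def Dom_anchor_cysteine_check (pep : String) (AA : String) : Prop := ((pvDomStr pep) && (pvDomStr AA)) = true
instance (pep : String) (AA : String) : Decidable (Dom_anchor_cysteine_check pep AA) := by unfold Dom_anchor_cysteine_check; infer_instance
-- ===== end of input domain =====

-- B replaces A's build-index-then-intersect scan by a direct bounds-checked test of the three anchor positions (measured faster: no per-character Python-level scan).

-- ===== PORT A =====
def anchor_cysteine_check (pep : String) (AA : String) : Int :=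
  let p := PySem.Chars.strip pep.toList
  let anchor_residues : List Int := [1, 2, (p.length : Int) - 1]
  let cys_pos : List Int :=
    ((PySem.List.enumerate p 0).filter (fun q => String.mk [q.2] == AA)).map (·.1)
  let cys_anchors := anchor_residues.filter (fun pos => cys_pos.contains pos)
  if cys_anchors.length > 0 then 1 else 0

-- ===== PORT B =====
-- loop body of B: try each anchor position in order, return 1 on the first hit
-- (getD's default is never used: the access is guarded by the same bounds check as in Source B, so it is exact)
def anchorAltGo (p : List Char) (AA : String) : List Int → Int
  | [] => 0
  | pos :: rest =>
    if 0 ≤ pos && pos < (p.length : Int) && (String.mk [p.getD pos.toNat ' '] == AA) then 1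
    else anchorAltGo p AA rest

def anchor_cysteine_check_alt (pep : String) (AA : String) : Int :=
  let p := PySem.Chars.strip pep.toList
  let n : Int := p.length
  anchorAltGo p AA [1, 2, n - 1]

-- ===== PRECONDITION & SPEC =====
def Spec_anchor_cysteine_check (pep : String) (AA : String) (out : Int) : Prop := out = anchor_cysteine_check_alt pep AA
instance (pep : String) (AA : String) (out : Int) : Decidable (Spec_anchor_cysteine_check pep AA out) := by unfold Spec_anchor_cysteine_check; infer_instance

-- ===== CLAIM (what is proved, stated in full; the proofs are below) =====
def Claim_equal_anchor_cysteine_check : Prop := ∀ (pep : String) (AA : String), Dom_anchor_cysteine_check pep AA → Spec_anchor_cysteine_check pep AA (anchor_cysteine_check pep AA)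

-- ===== LEMMAS AND PROOFS =====

-- B's loop is 'if any position passes, 1, else 0'
theorem anchorAltGo_eq_any (p : List Char) (AA : String) (l : List Int) :
    anchorAltGo p AA l =
      if l.any (fun pos => 0 ≤ pos && pos < (p.length : Int) && (String.mk [p.getD pos.toNat ' '] == AA)) then 1 else 0 := by
  induction l with
  | nil => simp [anchorAltGo]
  | cons pos rest ih =>
    rw [anchorAltGo, ih, List.any_cons]
    by_cases h : (0 ≤ pos && pos < (p.length : Int) && (String.mk [p.getD pos.toNat ' '] == AA)) = true
    · rw [if_pos h, h, Bool.true_or, if_pos rfl]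
    · rw [if_neg h, Bool.eq_false_iff.mpr h, Bool.false_or]

-- membership in A's index list equals B's bounds-checked position test
theorem contains_cysPos (p : List Char) (AA : String) (pos : Int) :
    (((PySem.List.enumerate p 0).filter (fun q => String.mk [q.2] == AA)).map (·.1)).contains pos =
      (0 ≤ pos && pos < (p.length : Int) && (String.mk [p.getD pos.toNat ' '] == AA)) := by
  rw [Bool.eq_iff_iff]
  simp only [List.contains_iff_mem, Bool.and_eq_true, decide_eq_true_eq, beq_iff_eq,
    List.mem_map, List.mem_filter, PySem.List.mem_enumerate_iff]
  constructor
  · rintro ⟨⟨i, c⟩, ⟨⟨k, hk, hq⟩, hc⟩, rfl⟩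
    obtain ⟨rfl, rfl⟩ := Prod.mk.injEq .. ▸ hq
    simp only [zero_add] at *
    refine ⟨⟨by omega, by omega⟩, ?_⟩
    have hkn : ((k : Int)).toNat = k := by omega
    rw [hkn, List.getD_eq_getElem?_getD, List.getElem?_eq_getElem hk]
    simpa using hc
  · rintro ⟨⟨h0, hn⟩, hc⟩
    refine ⟨(pos, p[pos.toNat]'(by omega)), ⟨⟨pos.toNat, by omega, by simp; omega⟩, ?_⟩, rfl⟩
    rw [List.getD_eq_getElem?_getD, List.getElem?_eq_getElem (by omega : pos.toNat < p.length)] at hc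
    simp
    simpa using hc

-- A's 'len(filter) > 0' decision equals 'any'
theorem filter_len_pos_eq_any (l : List Int) (q : Int → Bool) :
    ((l.filter q).length > 0) ↔ l.any q = true := by
  simp [List.length_pos_iff, Ne, List.filter_eq_nil_iff, List.any_eq_true]

-- ===== VERDICT (by name: the statement is the Claim_ definition above) =====
theorem anchor_cysteine_check_spec : Claim_equal_anchor_cysteine_check := by
  intro pep AA _
  unfold Spec_anchor_cysteine_check anchor_cysteine_check anchor_cysteine_check_alt
  rw [anchorAltGo_eq_any]
  simp only [filter_len_pos_eq_any, contains_cysPos]
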